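-- pv_equiv track=rewrite | github.com/DataScienceLab-HGW/Text2HBM2.0 | pddl_generator.py | add_property
-- ===== SOURCE A (Python) =====
-- from typing import Tuple
-- from typing import List
--
-- def add_property(action : str, list_of_properties : List[Tuple[str,str]])->str:
--     """
--     list of properties example: [("from","table")]
--
-- 	addProperty :: String -> [(String,String)] -> String
-- 	addProperty _ [] = ""
-- 	addProperty a ((d,e):xs)
-- 		 | a /= e = "(property-" ++ d ++ " ?" ++ e ++ ")\n \t \t \t" ++ addProperty a xs
-- 		 | otherwise = "(property-" ++ d ++ ")\n \t \t \t" ++ addProperty a xs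
--
-- 	"""
--     if len(list_of_properties) == 0:
--        return ""
--     else:
--        template = ""
--        for prop in list_of_properties:
--            if  action != prop[1]:
--                template = template + "(property-" + prop[0] + " ?" + prop[1] + ")\n \t \t \t"
--            else:
--                template = "(property-" + prop[0] + ")\n \t \t \t"
--     return template
-- ===== SOURCE B (Python) =====
-- from typing import Tuple
-- from typing import List
--
-- def add_property(action : str, list_of_properties : List[Tuple[str,str]])->str:
--     # Only the suffix after the LAST matching element matters: scan from the end,
--     # prepending each element's piece; at the first match (in reverse) prepend the
--     # reset piece and stop, discarding everything earlier.
--     parts = []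
--     for d, e in reversed(list_of_properties):
--         if action == e:
--             parts.insert(0, "(property-" + d + ")\n \t \t \t")
--             break
--         parts.insert(0, "(property-" + d + " ?" + e + ")\n \t \t \t")
--     return "".join(parts)
-- ===== Notes on version B (the rewrite author's own statement) =====
-- stated objective: alternative
-- what changed: Instead of A's forward loop whose accumulator is reset at every match, B scans the list in reverse and stops at the first match (the last matching element), collecting pieces and joining once, so elements before the last match are never touched and no quadratic string re-concatenation happens.
import Mathlib
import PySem

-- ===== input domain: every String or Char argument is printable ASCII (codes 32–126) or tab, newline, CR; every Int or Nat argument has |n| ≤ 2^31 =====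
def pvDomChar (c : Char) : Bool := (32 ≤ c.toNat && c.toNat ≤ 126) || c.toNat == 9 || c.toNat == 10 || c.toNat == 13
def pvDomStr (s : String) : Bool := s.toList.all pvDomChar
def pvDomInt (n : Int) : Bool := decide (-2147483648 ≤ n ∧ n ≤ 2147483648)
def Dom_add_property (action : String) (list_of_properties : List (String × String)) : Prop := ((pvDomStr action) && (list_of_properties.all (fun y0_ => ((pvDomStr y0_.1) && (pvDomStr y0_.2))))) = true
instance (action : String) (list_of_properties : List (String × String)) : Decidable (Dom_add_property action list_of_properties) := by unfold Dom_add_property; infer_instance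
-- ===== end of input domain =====

-- ===== PORT A =====
-- A: single forward loop; a matching element RESETS the accumulator to its reset-piece.
def add_property (action : String) (list_of_properties : List (String × String)) : String :=
  if list_of_properties.length = 0 then ""
  else
    list_of_properties.foldl (fun template prop =>
      if action ≠ prop.2 then
        template ++ "(property-" ++ prop.1 ++ " ?" ++ prop.2 ++ ")\n \t \t \t"
      else
        "(property-" ++ prop.1 ++ ")\n \t \t \t") ""

-- ===== PORT B =====
-- B: scan the REVERSED list, prepending pieces; stop at the first match (the last
-- matching element of the original list), discarding everything before it.
def add_property_altGo (action : String) : List (String × String) → String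
  | [] => ""
  | p :: rest =>
    if action = p.2 then
      "(property-" ++ p.1 ++ ")\n \t \t \t"
    else
      add_property_altGo action rest ++ ("(property-" ++ p.1 ++ " ?" ++ p.2 ++ ")\n \t \t \t")

def add_property_alt (action : String) (list_of_properties : List (String × String)) : String :=
  add_property_altGo action list_of_properties.reverse

-- ===== PRECONDITION & SPEC =====
def Spec_add_property (action : String) (list_of_properties : List (String × String)) (out : String) : Prop := out = add_property_alt action list_of_properties
instance (action : String) (list_of_properties : List (String × String)) (out : String) : Decidable (Spec_add_property action list_of_properties out) := by unfold Spec_add_property; infer_instance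

-- ===== CLAIM (what is proved, stated in full; the proofs are below) =====
def Claim_equal_add_property : Prop := ∀ (action : String) (list_of_properties : List (String × String)), Dom_add_property action list_of_properties → Spec_add_property action list_of_properties (add_property action list_of_properties)

-- ===== LEMMAS AND PROOFS =====

lemma add_property_key (action : String) (l : List (String × String)) (acc : String) :
    l.foldl (fun template prop =>
      if action ≠ prop.2 then
        template ++ "(property-" ++ prop.1 ++ " ?" ++ prop.2 ++ ")\n \t \t \t"
      else
        "(property-" ++ prop.1 ++ ")\n \t \t \t") acc =
    if l.any (fun p => action == p.2) then add_property_altGo action l.reverse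
    else acc ++ add_property_altGo action l.reverse := by
  induction l using List.reverseRecOn generalizing acc with
  | nil => simp [add_property_altGo]
  | append_singleton l x ih =>
    rw [List.foldl_append]
    simp only [List.foldl_cons, List.foldl_nil, List.reverse_append, List.reverse_singleton,
      List.singleton_append, List.any_append, List.any_cons, List.any_nil, add_property_altGo]
    by_cases h : action = x.2
    · simp [h]
    · have hne : (action == x.2) = false := by simp [h]
      rw [ih]
      by_cases hany : l.any (fun p => action == p.2)
      · simp [h, hne, hany, String.append_assoc]
      · simp [h, hne, hany, String.append_assoc]

-- ===== VERDICT (by name: the statement is the Claim_ definition above) =====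
theorem add_property_spec : Claim_equal_add_property := by
  intro action l _
  unfold Spec_add_property add_property add_property_alt
  rcases l with _ | ⟨p, rest⟩
  · simp [add_property_altGo]
  · rw [if_neg (by simp)]
    rw [add_property_key]
    split
    · rfl
    · exact String.empty_append
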